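-- pv_equiv track=rewrite | github.com/qyy752457002/School-Management-System | rules/work_flow_define_rule.py | generate_depend_code
-- ===== SOURCE A (Python) =====
-- def generate_depend_code(pre, process_type, source, target):
--     """生成depend的主键"""
--
--     if process_type == "transfer" or process_type == "borrow":
--         source_keywords = "_".join([word for word in source.split('_')][3:5])
--         target_keywords = "_".join([word for word in target.split('_')][3:5])
--         return f"{pre}_{source_keywords}_to_{target_keywords}"
--     elif process_type == "entry" or process_type == "info" or process_type == "change":
--         source_keywords = "_".join([word for word in source.split('_')][1:3])
--         target_keywords = "_".join([word for word in target.split('_')][1:3])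
--         return f"{pre}_{source_keywords}_to_{target_keywords}"
-- ===== SOURCE B (Python) =====
-- def _between(s, k):
--     # chars of s strictly between the k-th and the (k+2)-th '_' (1-based count),
--     # collected in one scan; equals "_".join(s.split('_')[k:k+2]) without splitting
--     cnt = 0
--     out = []
--     for ch in s:
--         if ch == '_':
--             cnt += 1
--             if cnt >= k + 2:
--                 break
--             if cnt > k:
--                 out.append(ch)
--         elif cnt >= k:
--             out.append(ch)
--     return ''.join(out)
--
-- def generate_depend_code(pre, process_type, source, target):
--     """生成depend的主键"""
--     if process_type in ("transfer", "borrow"):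
--         k = 3
--     elif process_type in ("entry", "info", "change"):
--         k = 1
--     else:
--         return None
--     return f"{pre}_{_between(source, k)}_to_{_between(target, k)}"
-- ===== Notes on version B (the rewrite author's own statement) =====
-- stated objective: alternative
-- what changed: Replaces split('_') + list slice + '_'.join per string with a single character scan that counts underscores and collects exactly the characters lying between the k-th and (k+2)-th underscore, never materialising the token list.
import Mathlib
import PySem

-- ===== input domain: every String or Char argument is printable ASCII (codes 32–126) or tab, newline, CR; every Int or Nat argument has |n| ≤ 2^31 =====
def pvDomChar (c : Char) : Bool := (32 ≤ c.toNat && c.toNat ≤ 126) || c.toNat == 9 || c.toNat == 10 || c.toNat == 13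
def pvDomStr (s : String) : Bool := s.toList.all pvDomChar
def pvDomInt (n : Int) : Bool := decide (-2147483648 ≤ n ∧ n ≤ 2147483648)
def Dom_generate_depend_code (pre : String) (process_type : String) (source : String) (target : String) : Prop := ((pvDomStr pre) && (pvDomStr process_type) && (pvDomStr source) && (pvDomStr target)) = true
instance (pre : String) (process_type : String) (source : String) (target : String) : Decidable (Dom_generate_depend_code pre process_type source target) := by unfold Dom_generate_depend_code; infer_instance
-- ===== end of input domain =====

-- B replaces A's split('_') / slice / '_'.join per string with one character scan that counts
-- underscores and collects the characters between the k-th and (k+2)-th underscore (objective: alternative).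

-- ===== PORT A =====
def generate_depend_code (pre : String) (process_type : String) (source : String) (target : String) : Option String :=
  if process_type == "transfer" || process_type == "borrow" then
    let source_keywords := PySem.Chars.join ['_'] (PySem.List.slice (PySem.Chars.splitOn source.toList ['_']) (some 3) (some 5))
    let target_keywords := PySem.Chars.join ['_'] (PySem.List.slice (PySem.Chars.splitOn target.toList ['_']) (some 3) (some 5))
    some (String.mk (pre.toList ++ ['_'] ++ source_keywords ++ "_to_".toList ++ target_keywords))
  else if process_type == "entry" || process_type == "info" || process_type == "change" then
    let source_keywords := PySem.Chars.join ['_'] (PySem.List.slice (PySem.Chars.splitOn source.toList ['_']) (some 1) (some 3))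
    let target_keywords := PySem.Chars.join ['_'] (PySem.List.slice (PySem.Chars.splitOn target.toList ['_']) (some 1) (some 3))
    some (String.mk (pre.toList ++ ['_'] ++ source_keywords ++ "_to_".toList ++ target_keywords))
  else
    none

-- ===== PORT B =====
-- the for-loop of Source B's _between: state = (cnt, out); the early 'break' returns out
def pvBetweenGo (k : Int) : List Char → Int → List Char → List Char
  | [], _, out => out
  | c :: rest, cnt, out =>
    if c == '_' then
      if cnt + 1 ≥ k + 2 then out
      else if cnt + 1 > k then pvBetweenGo k rest (cnt + 1) (out ++ [c])
      else pvBetweenGo k rest (cnt + 1) out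
    else if cnt ≥ k then pvBetweenGo k rest cnt (out ++ [c])
    else pvBetweenGo k rest cnt out

def pvBetween (s : String) (k : Int) : List Char := pvBetweenGo k s.toList 0 []

def generate_depend_code_alt (pre : String) (process_type : String) (source : String) (target : String) : Option String :=
  if ["transfer", "borrow"].contains process_type then
    some (String.mk (pre.toList ++ ['_'] ++ pvBetween source 3 ++ "_to_".toList ++ pvBetween target 3))
  else if ["entry", "info", "change"].contains process_type then
    some (String.mk (pre.toList ++ ['_'] ++ pvBetween source 1 ++ "_to_".toList ++ pvBetween target 1))
  else
    none

-- ===== PRECONDITION & SPEC =====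
def Spec_generate_depend_code (pre : String) (process_type : String) (source : String) (target : String) (out : Option String) : Prop := out = generate_depend_code_alt pre process_type source target
instance (pre : String) (process_type : String) (source : String) (target : String) (out : Option String) : Decidable (Spec_generate_depend_code pre process_type source target out) := by unfold Spec_generate_depend_code; infer_instance

-- ===== CLAIM (what is proved, stated in full; the proofs are below) =====
def Claim_equal_generate_depend_code : Prop := ∀ (pre : String) (process_type : String) (source : String) (target : String), Dom_generate_depend_code pre process_type source target → Spec_generate_depend_code pre process_type source target (generate_depend_code pre process_type source target)

-- ===== LEMMAS AND PROOFS =====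

-- a clean structural recursion computing s.split('_') (cur is the reversed current token)
def pySplitU (cur : List Char) : List Char → List (List Char)
  | [] => [cur.reverse]
  | c :: t => if c = '_' then cur.reverse :: pySplitU [] t else pySplitU (c :: cur) t

theorem splitOn_go_eq (l : List Char) : ∀ (fuel : Nat), l.length ≤ fuel → ∀ (cur : List Char) (acc : List (List Char)),
    PySem.Chars.splitOn.go ['_'] fuel l cur acc = acc.reverse ++ pySplitU cur l := by
  induction l with
  | nil =>
    intro fuel _ cur acc
    cases fuel <;> simp [PySem.Chars.splitOn.go, pySplitU]
  | cons c t ih =>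
    intro fuel hf cur acc
    cases fuel with
    | zero => simp at hf
    | succ f =>
      simp only [List.length_cons] at hf
      by_cases hc : c = '_'
      · subst hc
        have hpre : List.isPrefixOf ['_'] ('_' :: t) = true := by
          simp [List.isPrefixOf]
        simp only [PySem.Chars.splitOn.go, hpre, if_pos]
        rw [show List.drop ['_'].length ('_' :: t) = t by simp]
        rw [ih f (by omega) [] (cur.reverse :: acc)]
        simp [pySplitU]
      · have hpre : List.isPrefixOf ['_'] (c :: t) = false := by
          simp [List.isPrefixOf, hc]
          exact fun h => hc h.symm
        simp only [PySem.Chars.splitOn.go, hpre]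
        rw [if_neg (by simp [hpre])]
        rw [ih f (by omega) (c :: cur) acc]
        simp [pySplitU, hc]

theorem splitOn_eq (s : List Char) : PySem.Chars.splitOn s ['_'] = pySplitU [] s := by
  unfold PySem.Chars.splitOn
  rw [splitOn_go_eq s (s.length + 1) (by omega) [] []]
  simp

-- pySplitU with a pending token only changes the head of the result
theorem pySplitU_shape (l : List Char) : ∀ (cur : List Char),
    pySplitU cur l = (cur.reverse ++ (pySplitU [] l).headI) :: (pySplitU [] l).tail := by
  induction l with
  | nil => intro cur; simp [pySplitU]
  | cons c t ih =>
    intro cur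
    by_cases hc : c = '_'
    · subst hc; simp [pySplitU]
    · simp only [pySplitU, if_neg hc]
      rw [ih (c :: cur), ih [c]]
      simp

theorem pySplitU_nil_shape (l : List Char) :
    pySplitU [] l = (pySplitU [] l).headI :: (pySplitU [] l).tail := by
  have := pySplitU_shape l []
  simpa using this

-- the scan's accumulator factors out
theorem pvBetweenGo_out (k : Int) (l : List Char) : ∀ (cnt : Int) (out : List Char),
    pvBetweenGo k l cnt out = out ++ pvBetweenGo k l cnt [] := by
  induction l with
  | nil => intro cnt out; simp [pvBetweenGo]
  | cons c t ih =>
    intro cnt out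
    simp only [pvBetweenGo]
    split_ifs with hA hB hC hD
    · simp
    · rw [ih (cnt + 1) (out ++ [c]), ih (cnt + 1) ([] ++ [c])]
      simp
    · exact ih (cnt + 1) out
    · rw [ih cnt (out ++ [c]), ih cnt ([] ++ [c])]
      simp
    · exact ih cnt out

-- unfolding helpers for the scan
theorem pvBetweenGo_cons_us (k cnt : Int) (t : List Char) (out : List Char) :
    pvBetweenGo k ('_' :: t) cnt out =
      if cnt + 1 ≥ k + 2 then out
      else if cnt + 1 > k then pvBetweenGo k t (cnt + 1) (out ++ ['_'])
      else pvBetweenGo k t (cnt + 1) out := by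
  simp [pvBetweenGo]

theorem pvBetweenGo_cons_ne (k cnt : Int) (c : Char) (t : List Char) (out : List Char) (hc : c ≠ '_') :
    pvBetweenGo k (c :: t) cnt out =
      if cnt ≥ k then pvBetweenGo k t cnt (out ++ [c])
      else pvBetweenGo k t cnt out := by
  simp [pvBetweenGo, hc]

-- only k - cnt matters
theorem pvBetweenGo_shift (l : List Char) : ∀ (k cnt : Int),
    pvBetweenGo k l cnt [] = pvBetweenGo (k - cnt) l 0 [] := by
  induction l with
  | nil => intro k cnt; simp [pvBetweenGo]
  | cons c t ih =>
    intro k cnt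
    by_cases hc : c = '_'
    · subst hc
      rw [pvBetweenGo_cons_us k cnt t [], pvBetweenGo_cons_us (k - cnt) 0 t []]
      by_cases h1 : cnt + 1 ≥ k + 2
      · rw [if_pos h1, if_pos (show (0 : Int) + 1 ≥ (k - cnt) + 2 by omega)]
      · rw [if_neg h1, if_neg (show ¬ ((0 : Int) + 1 ≥ (k - cnt) + 2) by omega)]
        by_cases h2 : cnt + 1 > k
        · rw [if_pos h2, if_pos (show (0 : Int) + 1 > k - cnt by omega)]
          simp only [List.nil_append]
          rw [pvBetweenGo_out k t (cnt + 1) ['_'], pvBetweenGo_out (k - cnt) t (0 + 1) ['_']]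
          rw [ih k (cnt + 1), ih (k - cnt) (0 + 1),
              show k - (cnt + 1) = k - cnt - (0 + 1) by ring]
        · rw [if_neg h2, if_neg (show ¬ ((0 : Int) + 1 > k - cnt) by omega)]
          rw [ih k (cnt + 1), ih (k - cnt) (0 + 1),
              show k - (cnt + 1) = k - cnt - (0 + 1) by ring]
    · rw [pvBetweenGo_cons_ne k cnt c t [] hc, pvBetweenGo_cons_ne (k - cnt) 0 c t [] hc]
      by_cases h3 : cnt ≥ k
      · rw [if_pos h3, if_pos (show (0 : Int) ≥ k - cnt by omega)]
        simp only [List.nil_append]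
        rw [pvBetweenGo_out k t cnt [c], pvBetweenGo_out (k - cnt) t 0 [c]]
        rw [ih k cnt, show k - cnt = k - cnt - 0 by ring]
      · rw [if_neg h3, if_neg (show ¬ ((0 : Int) ≥ k - cnt) by omega)]
        rw [ih k cnt, show k - cnt = k - cnt - 0 by ring]

-- phase -1: the scan collects exactly the first token
theorem pvBetweenGo_neg_one (l : List Char) :
    pvBetweenGo (-1) l 0 [] = (pySplitU [] l).headI := by
  induction l with
  | nil => simp [pvBetweenGo, pySplitU]
  | cons c t ih =>
    by_cases hc : c = '_'
    · subst hc
      rw [pvBetweenGo_cons_us (-1) 0 t [], if_pos (show (0 : Int) + 1 ≥ (-1) + 2 by omega)]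
      simp [pySplitU]
    · rw [pvBetweenGo_cons_ne (-1) 0 c t [] hc, if_pos (show (0 : Int) ≥ (-1) by omega)]
      simp only [List.nil_append]
      rw [pvBetweenGo_out (-1) t 0 [c], ih]
      rw [show pySplitU [] (c :: t) = pySplitU [c] t by simp [pySplitU, hc]]
      rw [pySplitU_shape t [c]]
      simp

theorem join_cons_head (c : Char) (h : List Char) (r : List (List Char)) :
    PySem.Chars.join ['_'] ((c :: h) :: r) = c :: PySem.Chars.join ['_'] (h :: r) := by
  cases r with
  | nil => simp [PySem.Chars.join, List.intercalate]
  | cons y r' => simp [PySem.Chars.join, List.intercalate]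

-- phase 0: the scan collects the first two tokens joined by '_'
theorem pvBetweenGo_zero (l : List Char) :
    pvBetweenGo 0 l 0 [] = PySem.Chars.join ['_'] ((pySplitU [] l).take 2) := by
  induction l with
  | nil => simp [pvBetweenGo, pySplitU, PySem.Chars.join, List.intercalate]
  | cons c t ih =>
    by_cases hc : c = '_'
    · subst hc
      rw [pvBetweenGo_cons_us 0 0 t [], if_neg (show ¬ ((0 : Int) + 1 ≥ 0 + 2) by omega),
          if_pos (show (0 : Int) + 1 > 0 by omega)]
      simp only [List.nil_append]
      rw [pvBetweenGo_out 0 t (0 + 1) ['_']]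
      rw [show (0 : Int) + 1 = 1 by norm_num, pvBetweenGo_shift t 0 1]
      rw [show (0 : Int) - 1 = -1 by norm_num, pvBetweenGo_neg_one]
      rw [show pySplitU [] ('_' :: t) = [] :: pySplitU [] t by simp [pySplitU]]
      rw [pySplitU_nil_shape t]
      simp [PySem.Chars.join, List.intercalate]
    · rw [pvBetweenGo_cons_ne 0 0 c t [] hc, if_pos (show (0 : Int) ≥ 0 by omega)]
      simp only [List.nil_append]
      rw [pvBetweenGo_out 0 t 0 [c], ih]
      rw [show pySplitU [] (c :: t) = pySplitU [c] t by simp [pySplitU, hc]]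
      rw [pySplitU_shape t [c], pySplitU_nil_shape t]
      rw [List.take_cons (by omega : 0 < 2), List.take_cons (by omega : 0 < 2)]
      simp only [List.reverse_singleton, List.singleton_append]
      exact (join_cons_head c _ _).symm

-- phase k ≥ 1: the scan skips the first k tokens, then collects two joined by '_'
theorem pvBetweenGo_pos (l : List Char) : ∀ (k : Int), 1 ≤ k →
    pvBetweenGo k l 0 [] = PySem.Chars.join ['_'] (((pySplitU [] l).drop k.toNat).take 2) := by
  induction l with
  | nil =>
    intro k hk
    have hdrop : (pySplitU [] ([] : List Char)).drop k.toNat = [] := by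
      simp [pySplitU]
      omega
    simp [pvBetweenGo, hdrop, PySem.Chars.join, List.intercalate]
  | cons c t ih =>
    intro k hk
    by_cases hc : c = '_'
    · subst hc
      rw [pvBetweenGo_cons_us k 0 t [], if_neg (show ¬ ((0 : Int) + 1 ≥ k + 2) by omega),
          if_neg (show ¬ ((0 : Int) + 1 > k) by omega)]
      rw [show (0 : Int) + 1 = 1 by norm_num, pvBetweenGo_shift t k 1]
      rw [show pySplitU [] ('_' :: t) = [] :: pySplitU [] t by simp [pySplitU]]
      have hkn : k.toNat = (k - 1).toNat + 1 := by omega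
      rw [hkn, List.drop_succ_cons]
      by_cases hk1 : k = 1
      · subst hk1
        norm_num
        rw [pvBetweenGo_zero]
      · rw [ih (k - 1) (by omega)]
    · rw [pvBetweenGo_cons_ne k 0 c t [] hc, if_neg (show ¬ ((0 : Int) ≥ k) by omega)]
      rw [ih k hk]
      rw [show pySplitU [] (c :: t) = pySplitU [c] t by simp [pySplitU, hc]]
      rw [pySplitU_shape t [c], pySplitU_nil_shape t]
      have hkn : k.toNat = (k - 1).toNat + 1 := by omega
      rw [hkn]
      simp [List.drop_succ_cons]

-- the A-side expression for one string equals B's scan, k ∈ {1, 3}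
theorem seg_eq (s : String) (k : Nat) (hk : 1 ≤ k) :
    PySem.Chars.join ['_'] (PySem.List.slice (PySem.Chars.splitOn s.toList ['_']) (some (k : Int)) (some ((k : Int) + 2))) = pvBetween s (k : Int) := by
  rw [splitOn_eq]
  rw [show ((k : Int) + 2) = ((k : Int) + ((2 : Nat) : Int)) by norm_num]
  rw [PySem.List.slice_natCast_add]
  unfold pvBetween
  rw [pvBetweenGo_pos s.toList (k : Int) (by exact_mod_cast hk)]
  norm_num

-- ===== VERDICT (by name: the statement is the Claim_ definition above) =====
theorem generate_depend_code_spec : Claim_equal_generate_depend_code := by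
  intro pre pt source target _
  unfold Spec_generate_depend_code generate_depend_code generate_depend_code_alt
  have hs3 := seg_eq source 3 (by omega)
  have ht3 := seg_eq target 3 (by omega)
  have hs1 := seg_eq source 1 (by omega)
  have ht1 := seg_eq target 1 (by omega)
  norm_num at hs3 ht3 hs1 ht1
  by_cases h1 : pt = "transfer"
  · simp [h1, hs3, ht3]
  by_cases h2 : pt = "borrow"
  · simp [h2, hs3, ht3]
  by_cases h3 : pt = "entry"
  · simp [h1, h2, h3, hs1, ht1]
  by_cases h4 : pt = "info"
  · simp [h1, h2, h4, hs1, ht1]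
  by_cases h5 : pt = "change"
  · simp [h1, h2, h5, hs1, ht1]
  simp [h1, h2, h3, h4, h5]
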